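-- pv_equiv track=rewrite | github.com/umairgillani93/codeforces-solutions | queue.py | find_indexes
-- ===== SOURCE A (Python) =====
-- def find_indexes(s):
--     indexes = []
--     for i in range(len(s)-1):
--         if s[i] == 'B' and s[i+1] == 'G':
--             indexes.append(i)
--
--         else:
--             continue
--
--     return indexes
-- ===== SOURCE B (Python) =====
-- def find_indexes(s):
--     indexes = []
--     i = s.find('BG')
--     while i != -1:
--         indexes.append(i)
--         i = s.find('BG', i + 2)
--     return indexes
-- ===== Notes on version B (the rewrite author's own statement) =====
-- stated objective: faster
-- what changed: Replaces the per-index scan testing each adjacent character pair with a substring-search loop: repeatedly call s.find('BG', pos) and jump past each match (correct because 'BG' cannot overlap itself), so no explicit pairwise character comparison remains.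
import Mathlib
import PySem

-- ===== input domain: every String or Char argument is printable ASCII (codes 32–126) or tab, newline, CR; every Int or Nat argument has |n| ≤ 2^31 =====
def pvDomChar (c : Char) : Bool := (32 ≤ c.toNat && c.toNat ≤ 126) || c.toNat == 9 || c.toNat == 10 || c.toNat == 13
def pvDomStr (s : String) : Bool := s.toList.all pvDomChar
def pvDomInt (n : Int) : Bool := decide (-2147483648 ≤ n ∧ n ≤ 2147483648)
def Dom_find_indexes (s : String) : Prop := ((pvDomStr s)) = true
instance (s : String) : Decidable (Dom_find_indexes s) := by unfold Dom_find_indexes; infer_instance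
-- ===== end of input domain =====

-- B replaces A's per-index adjacent-pair scan by a substring-search loop:
-- repeated s.find('BG', pos) jumps from match to match ('BG' cannot overlap itself; same cost).

-- ===== PORT A =====
def find_indexes (s : String) : List Int :=
  (PySem.List.pyRange 0 ((PySem.Str.len s : Int) - 1) 1).foldl
    (fun acc i =>
      if PySem.Str.pyGet? s i = some 'B' ∧ PySem.Str.pyGet? s (i + 1) = some 'G' then
        acc ++ [i]
      else
        acc)
    []

-- ===== PORT B =====
-- the while loop: state is the index last returned by find; fuel bounds the iteration count
-- (each iteration restarts the search 2 positions further, so len+1 iterations always suffice)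
def altLoop (l : List Char) (fuel : Nat) (i : Int) (acc : List Int) : List Int :=
  match fuel with
  | 0 => acc
  | fuel' + 1 =>
    if i = -1 then acc
    else altLoop l fuel' (PySem.Chars.findFrom l ['B', 'G'] (i + 2) none) (acc ++ [i])

def find_indexes_alt (s : String) : List Int :=
  altLoop s.toList (s.toList.length + 1) (PySem.Chars.find s.toList ['B', 'G']) []

-- ===== PRECONDITION & SPEC =====
def Spec_find_indexes (s : String) (out : List Int) : Prop := out = find_indexes_alt s
instance (s : String) (out : List Int) : Decidable (Spec_find_indexes s out) := by unfold Spec_find_indexes; infer_instance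

-- ===== CLAIM (what is proved, stated in full; the proofs are below) =====
def Claim_equal_find_indexes : Prop := ∀ (s : String), Dom_find_indexes s → Spec_find_indexes s (find_indexes s)

-- ===== LEMMAS AND PROOFS =====

-- 'BG' starts at position i  ↔  l[i] = 'B' and l[i+1] = 'G'
theorem prefix_BG_iff (l : List Char) (i : Nat) :
    ['B', 'G'] <+: l.drop i ↔ (l[i]? = some 'B' ∧ l[i + 1]? = some 'G') := by
  constructor
  · rintro ⟨r, hr⟩
    have h0 : (l.drop i)[0]? = some 'B' := by rw [← hr]; rfl
    have h1 : (l.drop i)[1]? = some 'G' := by rw [← hr]; rfl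
    rw [List.getElem?_drop] at h0 h1
    simpa using ⟨h0, h1⟩
  · rintro ⟨h0, h1⟩
    have h0' : (l.drop i)[0]? = some 'B' := by rw [List.getElem?_drop]; simpa using h0
    have h1' : (l.drop i)[1]? = some 'G' := by rw [List.getElem?_drop]; simpa using h1
    rcases hd : l.drop i with _ | ⟨a, t⟩
    · simp [hd] at h0'
    · rcases t with _ | ⟨b, r⟩
      · simp [hd] at h1'
      · rw [hd] at h0' h1'
        simp at h0' h1'
        exact ⟨r, by simp [h0', h1']⟩

theorem prefix_drop_infix {α : Type} (sub t : List α) (m : Nat) (h : sub <+: t.drop m) :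
    sub <:+: t :=
  h.isInfix.trans (t.drop_suffix m).isInfix

-- main loop invariant: entering the loop with the result of find(…, k) collects
-- exactly the match positions in [k, len-1)
theorem altLoop_eq (l : List Char) (fuel k : Nat) (acc : List Int)
    (hk : k ≤ l.length) (hf : l.length + 1 ≤ fuel + k) :
    altLoop l fuel (PySem.Chars.findFrom l ['B', 'G'] (k : Int) none) acc =
      acc ++ (PySem.List.pyRange (k : Int) ((l.length : Int) - 1) 1).filter
        (fun i => decide (PySem.List.pyGet? l i = some 'B' ∧ PySem.List.pyGet? l (i + 1) = some 'G')) := by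
  induction fuel generalizing k acc with
  | zero => omega
  | succ fuel ih =>
    by_cases hneg : PySem.Chars.findFrom l ['B', 'G'] (k : Int) none = -1
    · -- no further match: every index in [k, len-1) fails the test
      rw [altLoop, hneg, if_pos rfl]
      have hnoin : ¬ (['B', 'G'] <:+: l.drop k) :=
        (PySem.Chars.findFrom_natCast_eq_neg_one_iff l ['B', 'G'] k hk).mp hneg
      have hfil : (PySem.List.pyRange (k : Int) ((l.length : Int) - 1) 1).filter
          (fun i => decide (PySem.List.pyGet? l i = some 'B' ∧ PySem.List.pyGet? l (i + 1) = some 'G')) = [] := by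
        rw [List.filter_eq_nil_iff]
        intro i hi
        rw [PySem.List.mem_pyRange_one] at hi
        simp only [decide_eq_true_eq, not_and]
        intro hB hG
        exact hnoin <| by
          have hcond : l[i.toNat]? = some 'B' ∧ l[i.toNat + 1]? = some 'G' := by
            rw [PySem.List.pyGet?_of_nonneg _ (by omega)] at hB
            rw [PySem.List.pyGet?_of_nonneg _ (by omega),
              show (i + 1).toNat = i.toNat + 1 by omega] at hG
            exact ⟨hB, hG⟩
          have hpre : ['B', 'G'] <+: (l.drop k).drop (i.toNat - k) := by
            rw [List.drop_drop, show k + (i.toNat - k) = i.toNat by omega]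
            exact (prefix_BG_iff l i.toNat).mpr hcond
          exact prefix_drop_infix _ _ _ hpre
      rw [hfil, List.append_nil]
    · -- a match at j: emit it, skip j+1 (it holds 'G', not 'B'), continue from j+2
      obtain ⟨hkj, hpre, hmin⟩ :=
        PySem.Chars.findFrom_natCast_spec l ['B', 'G'] k hk hneg
      set j : Int := PySem.Chars.findFrom l ['B', 'G'] (k : Int) none with hj
      obtain ⟨hB, hG⟩ := (prefix_BG_iff l j.toNat).mp hpre
      have hlt : j.toNat + 1 < l.length := (List.getElem?_eq_some_iff.mp hG).1
      have hjk : (k : Int) ≤ j := hkj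
      have hj2 : (j + 2) = ((j.toNat + 2 : Nat) : Int) := by omega
      rw [altLoop, if_neg hneg, hj2, ih (j.toNat + 2) (acc ++ [j]) (by omega) (by omega)]
      rw [List.append_assoc]
      congr 1
      -- range [k, len-1) splits at j; [k,j) is all non-matches; j matches; j+1 never matches
      rw [PySem.List.pyRange_one_append (k : Int) j ((l.length : Int) - 1) hjk (by omega),
        List.filter_append]
      have hfil1 : (PySem.List.pyRange (k : Int) j 1).filter
          (fun i => decide (PySem.List.pyGet? l i = some 'B' ∧ PySem.List.pyGet? l (i + 1) = some 'G')) = [] := by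
        rw [List.filter_eq_nil_iff]
        intro i hi
        rw [PySem.List.mem_pyRange_one] at hi
        simp only [decide_eq_true_eq, not_and]
        intro hB' hG'
        refine hmin i.toNat (by omega) (by omega) ?_
        rw [PySem.List.pyGet?_of_nonneg _ (by omega)] at hB'
        rw [PySem.List.pyGet?_of_nonneg _ (by omega),
          show (i + 1).toNat = i.toNat + 1 by omega] at hG'
        exact (prefix_BG_iff l i.toNat).mpr ⟨hB', hG'⟩
      -- (positions i in [k, j) range over Int; hmin speaks of Nat indices)
      rw [hfil1, List.nil_append,
        PySem.List.pyRange_one_cons (by omega : j < (l.length : Int) - 1)]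
      have hjmatch : (decide (PySem.List.pyGet? l j = some 'B' ∧ PySem.List.pyGet? l (j + 1) = some 'G')) = true := by
        simp only [decide_eq_true_eq]
        constructor
        · rw [PySem.List.pyGet?_of_nonneg _ (by omega)]; exact hB
        · rw [PySem.List.pyGet?_of_nonneg _ (by omega),
            show (j + 1).toNat = j.toNat + 1 by omega]; exact hG
      rw [List.filter_cons]
      simp only [hjmatch, if_true]
      -- filter over [j+1, len-1) = filter over [j+2, len-1): j+1 holds 'G' ≠ 'B'
      by_cases hend : j + 2 ≤ (l.length : Int) - 1
      · rw [PySem.List.pyRange_one_cons (by omega : j + 1 < (l.length : Int) - 1),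
          show j + 1 + 1 = j + 2 by ring]
        have hfail : (decide (PySem.List.pyGet? l (j + 1) = some 'B' ∧
            PySem.List.pyGet? l (j + 1 + 1) = some 'G')) = false := by
          simp only [decide_eq_false_iff_not, not_and]
          intro hB'
          rw [PySem.List.pyGet?_of_nonneg _ (by omega),
            show (j + 1).toNat = j.toNat + 1 by omega, hG] at hB'
          simp at hB'
        rw [List.filter_cons]
        simp only [hfail, Bool.false_eq_true, if_false, ← hj2]
        simp
      · rw [PySem.List.pyRange_one_eq_nil (by omega : (l.length : Int) - 1 ≤ j + 1),
          PySem.List.pyRange_one_eq_nil (by omega : (l.length : Int) - 1 ≤ ((j.toNat + 2 : Nat) : Int))]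
        simp

theorem find_indexes_eq_alt (s : String) : find_indexes s = find_indexes_alt s := by
  unfold find_indexes find_indexes_alt
  rw [PySem.List.foldl_append_ite_eq_filter, List.nil_append,
    ← PySem.Chars.findFrom_zero s.toList ['B', 'G'],
    show (0 : Int) = ((0 : Nat) : Int) by rfl,
    altLoop_eq s.toList (s.toList.length + 1) 0 [] (by omega) (by omega),
    List.nil_append, PySem.Str.len_eq]
  simp only [PySem.Str.pyGet?_eq]
  norm_num

-- ===== VERDICT (by name: the statement is the Claim_ definition above) =====
theorem find_indexes_spec : Claim_equal_find_indexes := by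
  intro s _
  unfold Spec_find_indexes
  exact find_indexes_eq_alt s
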